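-- pv_equiv track=rewrite | github.com/muhammadmohsinjs-web/paper-trading | backend/app/engine/trading_loop.py | _summarize_multicoin_results
-- ===== SOURCE A (Python) =====
-- from typing import Any
--
-- def _summarize_multicoin_results(results: list[dict[str, Any]]) -> dict[str, int]:
--     summary = {
--         "executed": 0,
--         "buy_executed": 0,
--         "sell_executed": 0,
--         "hold": 0,
--         "skipped": 0,
--         "failed": 0,
--     }
--     for item in results:
--         status = item.get("status")
--         action = item.get("action")
--         if status == "executed":
--             summary["executed"] += 1
--             if action == "BUY":
--                 summary["buy_executed"] += 1
--             elif action == "SELL":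
--                 summary["sell_executed"] += 1
--         elif status == "hold":
--             summary["hold"] += 1
--         elif status == "failed":
--             summary["failed"] += 1
--         else:
--             summary["skipped"] += 1
--     return summary
-- ===== SOURCE B (Python) =====
-- def _summarize_multicoin_results(results):
--     executed = sum(1 for item in results if item.get("status") == "executed")
--     hold = sum(1 for item in results if item.get("status") == "hold")
--     failed = sum(1 for item in results if item.get("status") == "failed")
--     skipped = len(results) - executed - hold - failed
--     buy_executed = sum(
--         1
--         for item in results
--         if item.get("status") == "executed" and item.get("action") == "BUY"
--     )
--     sell_executed = sum(
--         1
--         for item in results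
--         if item.get("status") == "executed" and item.get("action") == "SELL"
--     )
--     return {
--         "executed": executed,
--         "buy_executed": buy_executed,
--         "sell_executed": sell_executed,
--         "hold": hold,
--         "skipped": skipped,
--         "failed": failed,
--     }
-- ===== Notes on version B (the rewrite author's own statement) =====
-- stated objective: alternative
-- what changed: Replaces A's single loop with a cascading if/elif/else over a mutable summary dict by independent one-liner tallies per status (and per action among executed items), deriving skipped by subtraction len - executed - hold - failed, assembling the fixed-key dict at the end.
import Mathlib
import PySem

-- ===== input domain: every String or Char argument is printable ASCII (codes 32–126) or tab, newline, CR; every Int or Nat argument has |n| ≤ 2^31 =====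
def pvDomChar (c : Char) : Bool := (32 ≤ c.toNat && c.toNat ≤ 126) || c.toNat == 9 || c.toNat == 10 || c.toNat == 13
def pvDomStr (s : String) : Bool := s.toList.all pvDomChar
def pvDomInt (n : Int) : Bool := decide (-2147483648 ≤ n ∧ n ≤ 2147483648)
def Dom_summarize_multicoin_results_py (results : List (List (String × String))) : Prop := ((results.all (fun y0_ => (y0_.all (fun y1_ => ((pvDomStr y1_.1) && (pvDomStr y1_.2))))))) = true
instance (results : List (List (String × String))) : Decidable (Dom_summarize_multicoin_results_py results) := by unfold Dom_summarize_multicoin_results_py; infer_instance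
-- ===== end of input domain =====

-- B replaces A's cascading if/elif/else over a mutable summary dict by independent per-status
-- tallies with skipped derived by subtraction; same O(n) cost, different decomposition.


-- shared helper: item.get(k) on an input dict given as an association list (first match)
def pvItemGet (item : List (String × String)) (k : String) : Option String :=
  (PySem.Dict.mk item).get? k

-- ===== PORT A =====
-- the loop body: cascading if/elif/else updating the summary dict in place
def pvStepA (s : PySem.Dict String Int) (item : List (String × String)) : PySem.Dict String Int :=
  let status := pvItemGet item "status"
  let action := pvItemGet item "action"
  if status = some "executed" then
    let s := s.modify "executed" 0 (· + 1)
    if action = some "BUY" then s.modify "buy_executed" 0 (· + 1)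
    else if action = some "SELL" then s.modify "sell_executed" 0 (· + 1)
    else s
  else if status = some "hold" then s.modify "hold" 0 (· + 1)
  else if status = some "failed" then s.modify "failed" 0 (· + 1)
  else s.modify "skipped" 0 (· + 1)

def summarize_multicoin_results_py (results : List (List (String × String))) : List (String × Int) :=
  let summary : PySem.Dict String Int :=
    PySem.Dict.mk [("executed", 0), ("buy_executed", 0), ("sell_executed", 0),
                   ("hold", 0), ("skipped", 0), ("failed", 0)]
  (results.foldl pvStepA summary).items

-- ===== PORT B =====
def summarize_multicoin_results_py_alt (results : List (List (String × String))) : List (String × Int) :=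
  let executed : Int := results.countP (fun item => pvItemGet item "status" == some "executed")
  let hold : Int := results.countP (fun item => pvItemGet item "status" == some "hold")
  let failed : Int := results.countP (fun item => pvItemGet item "status" == some "failed")
  let skipped : Int := (results.length : Int) - executed - hold - failed
  let buy_executed : Int := results.countP
    (fun item => pvItemGet item "status" == some "executed" && pvItemGet item "action" == some "BUY")
  let sell_executed : Int := results.countP
    (fun item => pvItemGet item "status" == some "executed" && pvItemGet item "action" == some "SELL")
  [("executed", executed), ("buy_executed", buy_executed), ("sell_executed", sell_executed),
   ("hold", hold), ("skipped", skipped), ("failed", failed)]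

-- ===== PRECONDITION & SPEC =====
def Spec_summarize_multicoin_results_py (results : List (List (String × String))) (out : List (String × Int)) : Prop := out = summarize_multicoin_results_py_alt results
instance (results : List (List (String × String))) (out : List (String × Int)) : Decidable (Spec_summarize_multicoin_results_py results out) := by unfold Spec_summarize_multicoin_results_py; infer_instance

-- ===== CLAIM (what is proved, stated in full; the proofs are below) =====
def Claim_equal_summarize_multicoin_results_py : Prop := ∀ (results : List (List (String × String))), Dom_summarize_multicoin_results_py results → Spec_summarize_multicoin_results_py results (summarize_multicoin_results_py results)

-- ===== LEMMAS AND PROOFS =====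

-- the fold over A's loop keeps the summary dict in its fixed six-key shape, adding the tallies
theorem pvFoldA_invariant (l : List (List (String × String))) (e b sv h k f : Int) :
    l.foldl pvStepA (PySem.Dict.mk [("executed", e), ("buy_executed", b), ("sell_executed", sv),
                                    ("hold", h), ("skipped", k), ("failed", f)]) =
    PySem.Dict.mk
      [("executed", e + l.countP (fun item => pvItemGet item "status" == some "executed")),
       ("buy_executed", b + l.countP (fun item =>
          pvItemGet item "status" == some "executed" && pvItemGet item "action" == some "BUY")),
       ("sell_executed", sv + l.countP (fun item =>
          pvItemGet item "status" == some "executed" && pvItemGet item "action" == some "SELL")),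
       ("hold", h + l.countP (fun item => pvItemGet item "status" == some "hold")),
       ("skipped", k + ((l.length : Int)
          - l.countP (fun item => pvItemGet item "status" == some "executed")
          - l.countP (fun item => pvItemGet item "status" == some "hold")
          - l.countP (fun item => pvItemGet item "status" == some "failed"))),
       ("failed", f + l.countP (fun item => pvItemGet item "status" == some "failed"))] := by
  induction l generalizing e b sv h k f with
  | nil => simp
  | cons x xs ih =>
    simp only [List.foldl_cons, List.countP_cons, List.length_cons]
    by_cases hs : pvItemGet x "status" = some "executed"
    · by_cases hb : pvItemGet x "action" = some "BUY"
      · have : pvStepA (PySem.Dict.mk [("executed", e), ("buy_executed", b), ("sell_executed", sv),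
            ("hold", h), ("skipped", k), ("failed", f)]) x =
            PySem.Dict.mk [("executed", e + 1), ("buy_executed", b + 1), ("sell_executed", sv),
            ("hold", h), ("skipped", k), ("failed", f)] := by
          simp [pvStepA, hs, hb, PySem.Dict.modify, PySem.Dict.getD, PySem.Dict.get?,
                PySem.Dict.insert, PySem.Dict.contains]
        rw [this, ih]
        simp [hs, hb]
        omega
      · by_cases hl : pvItemGet x "action" = some "SELL"
        · have : pvStepA (PySem.Dict.mk [("executed", e), ("buy_executed", b), ("sell_executed", sv),
              ("hold", h), ("skipped", k), ("failed", f)]) x =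
              PySem.Dict.mk [("executed", e + 1), ("buy_executed", b), ("sell_executed", sv + 1),
              ("hold", h), ("skipped", k), ("failed", f)] := by
            simp [pvStepA, hs, hb, hl, PySem.Dict.modify, PySem.Dict.getD, PySem.Dict.get?,
                  PySem.Dict.insert, PySem.Dict.contains]
          rw [this, ih]
          simp [hs, hb, hl]
          omega
        · have : pvStepA (PySem.Dict.mk [("executed", e), ("buy_executed", b), ("sell_executed", sv),
              ("hold", h), ("skipped", k), ("failed", f)]) x =
              PySem.Dict.mk [("executed", e + 1), ("buy_executed", b), ("sell_executed", sv),
              ("hold", h), ("skipped", k), ("failed", f)] := by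
            simp [pvStepA, hs, hb, hl, PySem.Dict.modify, PySem.Dict.getD, PySem.Dict.get?,
                  PySem.Dict.insert, PySem.Dict.contains]
          rw [this, ih]
          simp [hs, hb, hl]
          omega
    · by_cases hh : pvItemGet x "status" = some "hold"
      · have : pvStepA (PySem.Dict.mk [("executed", e), ("buy_executed", b), ("sell_executed", sv),
            ("hold", h), ("skipped", k), ("failed", f)]) x =
            PySem.Dict.mk [("executed", e), ("buy_executed", b), ("sell_executed", sv),
            ("hold", h + 1), ("skipped", k), ("failed", f)] := by
          simp [pvStepA, hs, hh, PySem.Dict.modify, PySem.Dict.getD, PySem.Dict.get?,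
                PySem.Dict.insert, PySem.Dict.contains]
        rw [this, ih]
        simp [hs, hh]
        omega
      · by_cases hf : pvItemGet x "status" = some "failed"
        · have : pvStepA (PySem.Dict.mk [("executed", e), ("buy_executed", b), ("sell_executed", sv),
              ("hold", h), ("skipped", k), ("failed", f)]) x =
              PySem.Dict.mk [("executed", e), ("buy_executed", b), ("sell_executed", sv),
              ("hold", h), ("skipped", k), ("failed", f + 1)] := by
            simp [pvStepA, hs, hh, hf, PySem.Dict.modify, PySem.Dict.getD, PySem.Dict.get?,
                  PySem.Dict.insert, PySem.Dict.contains]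
          rw [this, ih]
          simp [hs, hh, hf]
          omega
        · have : pvStepA (PySem.Dict.mk [("executed", e), ("buy_executed", b), ("sell_executed", sv),
              ("hold", h), ("skipped", k), ("failed", f)]) x =
              PySem.Dict.mk [("executed", e), ("buy_executed", b), ("sell_executed", sv),
              ("hold", h), ("skipped", k + 1), ("failed", f)] := by
            simp [pvStepA, hs, hh, hf, PySem.Dict.modify, PySem.Dict.getD, PySem.Dict.get?,
                  PySem.Dict.insert, PySem.Dict.contains]
          rw [this, ih]
          simp [hs, hh, hf]
          omega

-- ===== VERDICT (by name: the statement is the Claim_ definition above) =====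
theorem summarize_multicoin_results_py_spec : Claim_equal_summarize_multicoin_results_py := by
  intro results _
  unfold Spec_summarize_multicoin_results_py summarize_multicoin_results_py summarize_multicoin_results_py_alt
  dsimp only
  rw [pvFoldA_invariant]
  simp
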